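-- pv_equiv track=rewrite | github.com/brigidar/sample_selection | selecting_controls.py | dup2
-- ===== SOURCE A (Python) =====
-- def dup2(thelist,thelist2):
--     d=list()
--     seen = set(thelist2)
--     for x in thelist:
--         if x in seen:
--             d.append('yes')
--         else:
--             d.append('no')
--             seen.add(x)
--     return d
-- ===== SOURCE B (Python) =====
-- def dup2(thelist, thelist2):
--     firsts = {}
--     for i, x in enumerate(thelist):
--         if x not in firsts:
--             firsts[x] = i
--     seen2 = set(thelist2)
--     return ['no' if x not in seen2 and firsts[x] == i else 'yes'
--             for i, x in enumerate(thelist)]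
-- ===== Notes on version B (the rewrite author's own statement) =====
-- stated objective: alternative
-- what changed: Replaces the single scan that mutates a growing seen-set with a two-pass decomposition: one pass builds a first-occurrence index table, then a stateless comprehension marks 'no' exactly where the value is outside thelist2 and at its first index.
import Mathlib
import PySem

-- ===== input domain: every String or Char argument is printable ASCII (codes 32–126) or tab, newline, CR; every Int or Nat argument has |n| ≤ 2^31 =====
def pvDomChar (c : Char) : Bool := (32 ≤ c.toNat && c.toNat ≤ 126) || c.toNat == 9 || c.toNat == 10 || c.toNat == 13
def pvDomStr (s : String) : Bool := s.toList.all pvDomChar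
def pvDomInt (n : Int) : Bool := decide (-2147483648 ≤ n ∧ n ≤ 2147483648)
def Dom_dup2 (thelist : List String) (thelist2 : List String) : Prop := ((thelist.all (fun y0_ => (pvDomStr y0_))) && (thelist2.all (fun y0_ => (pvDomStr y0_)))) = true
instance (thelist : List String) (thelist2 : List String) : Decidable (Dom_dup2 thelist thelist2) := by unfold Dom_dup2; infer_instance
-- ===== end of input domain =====

-- B replaces A's single scan with a mutating seen-set by a first-occurrence index
-- table built in one pass plus a stateless comprehension (alternative decomposition).

-- ===== PORT A =====
def dup2 (thelist : List String) (thelist2 : List String) : List String :=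
  (thelist.foldl
    (fun (st : List String × PySem.Set String) x =>
      if PySem.Set.contains st.2 x then (st.1 ++ ["yes"], st.2)
      else (st.1 ++ ["no"], PySem.Set.add st.2 x))
    ([], PySem.Set.ofList thelist2)).1

-- ===== PORT B =====
def dup2_alt (thelist : List String) (thelist2 : List String) : List String :=
  let firsts : PySem.Dict String Int :=
    (PySem.List.enumerate thelist 0).foldl
      (fun d p => if d.contains p.2 then d else d.insert p.2 p.1) PySem.Dict.empty
  let seen2 : PySem.Set String := PySem.Set.ofList thelist2
  (PySem.List.enumerate thelist 0).map (fun p =>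
    if ¬ PySem.Set.contains seen2 p.2 ∧ firsts.getD p.2 0 = p.1 then "no" else "yes")

-- ===== PRECONDITION & SPEC =====
def Spec_dup2 (thelist : List String) (thelist2 : List String) (out : List String) : Prop := out = dup2_alt thelist thelist2
instance (thelist : List String) (thelist2 : List String) (out : List String) : Decidable (Spec_dup2 thelist thelist2 out) := by unfold Spec_dup2; infer_instance

-- ===== CLAIM (what is proved, stated in full; the proofs are below) =====
def Claim_equal_dup2 : Prop := ∀ (thelist : List String) (thelist2 : List String), Dom_dup2 thelist thelist2 → Spec_dup2 thelist thelist2 (dup2 thelist thelist2)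

-- ===== LEMMAS AND PROOFS =====

-- Reference: element k is "yes" iff it is in `seen` or occurs earlier in the list.
def refSpec (seen : List String) : List String → List String
  | [] => []
  | x :: xs => if x ∈ seen then "yes" :: refSpec seen xs else "no" :: refSpec (x :: seen) xs

theorem refSpec_getElem? (seen xs : List String) (k : Nat) :
    (refSpec seen xs)[k]? =
      xs[k]?.map (fun v => if v ∈ seen ∨ v ∈ xs.take k then "yes" else "no") := by
  induction xs generalizing seen k with
  | nil => simp [refSpec]
  | cons x xs ih =>
    cases k with
    | zero =>
      simp only [refSpec]
      by_cases hx : x ∈ seen <;> simp [hx]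
    | succ k =>
      simp only [refSpec, List.take_succ_cons, List.getElem?_cons_succ]
      by_cases hx : x ∈ seen
      · rw [if_pos hx, List.getElem?_cons_succ, ih seen k]
        cases hv : xs[k]? with
        | none => simp
        | some v =>
          simp only [Option.map_some, Option.some.injEq, List.mem_cons]
          by_cases h1 : v ∈ seen
          · simp [h1]
          · by_cases h2 : v = x
            · simp [h2, hx]
            · simp [h1, h2]
      · rw [if_neg hx, List.getElem?_cons_succ, ih (x :: seen) k]
        cases hv : xs[k]? with
        | none => simp
        | some v =>
          simp only [Option.map_some, Option.some.injEq, List.mem_cons]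
          by_cases h1 : v ∈ seen <;> by_cases h2 : v = x <;>
            by_cases h3 : v ∈ xs.take k <;> simp [h1, h2, h3]

theorem refSpec_congr (s t : List String) (xs : List String)
    (h : ∀ y, y ∈ s ↔ y ∈ t) : refSpec s xs = refSpec t xs := by
  induction xs generalizing s t with
  | nil => rfl
  | cons x xs ih =>
    simp only [refSpec]
    by_cases hx : x ∈ s
    · rw [if_pos hx, if_pos ((h x).1 hx), ih s t h]
    · rw [if_neg hx, if_neg (fun hx' => hx ((h x).2 hx'))]
      refine congrArg _ (ih _ _ ?_)
      intro y; simp [h y]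

-- A's loop computes `acc ++ refSpec seen xs` (up to membership of the set).
theorem A_loop (xs : List String) (acc : List String) (seen : PySem.Set String) :
    (xs.foldl
      (fun (st : List String × PySem.Set String) x =>
        if PySem.Set.contains st.2 x then (st.1 ++ ["yes"], st.2)
        else (st.1 ++ ["no"], PySem.Set.add st.2 x))
      (acc, seen)).1 = acc ++ refSpec seen xs := by
  induction xs generalizing acc seen with
  | nil => simp [refSpec]
  | cons x xs ih =>
    simp only [List.foldl_cons, refSpec]
    by_cases hx : x ∈ seen
    · rw [if_pos (by simpa [PySem.Set.contains_iff] using hx), if_pos hx, ih]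
      simp
    · rw [if_neg (by simpa [PySem.Set.contains_iff] using hx), if_neg hx, ih]
      rw [refSpec_congr (PySem.Set.add seen x) (x :: seen) xs
        (by intro y; simp [PySem.Set.mem_add, or_comm])]
      simp

theorem dup2_eq_refSpec (xs ys : List String) :
    dup2 xs ys = refSpec ys xs := by
  unfold dup2
  rw [A_loop]
  rw [refSpec_congr (PySem.Set.ofList ys) ys xs (by intro y; simp [PySem.Set.mem_ofList])]
  simp

-- B's first-occurrence table: lookup is the first index in xs (offset by s), unless
-- the key was already in the starting dict.
theorem firsts_get? (xs : List String) (s : Int) (d : PySem.Dict String Int) (y : String) :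
    ((PySem.List.enumerate xs s).foldl
        (fun d p => if d.contains p.2 then d else d.insert p.2 p.1) d).get? y =
      match d.get? y with
      | some v => some v
      | none => (PySem.List.index? xs y).map (fun (j : Nat) => s + (j : Int)) := by
  induction xs generalizing s d with
  | nil =>
    simp only [PySem.List.enumerate_nil, List.foldl_nil]
    cases d.get? y <;> simp
  | cons x xs ih =>
    rw [PySem.List.enumerate_cons, List.foldl_cons]
    by_cases hc : d.contains x = true
    · rw [if_pos hc, ih]
      cases h : d.get? y with
      | some v => simp
      | none =>
        have hxy : x ≠ y := by
          intro he; subst he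
          rw [PySem.Dict.contains_eq_isSome_get?, h] at hc; simp at hc
        rw [PySem.List.index?_cons_of_ne xs hxy]
        simp only [Option.map_map]
        cases PySem.List.index? xs y with
        | none => simp
        | some m => simp; ring
    · rw [if_neg hc, ih]
      simp only
      by_cases hxy : y = x
      · subst hxy
        rw [PySem.Dict.get?_insert_self]
        have h : d.get? y = none := by
          rw [PySem.Dict.get?_eq_none_iff_contains]; simpa using hc
        rw [h, PySem.List.index?_cons_self]
        simp
      · rw [PySem.Dict.get?_insert_of_ne d s hxy]
        cases h : d.get? y with
        | some v => simp
        | none =>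
          rw [PySem.List.index?_cons_of_ne xs (Ne.symm hxy)]
          simp only [Option.map_map]
          cases PySem.List.index? xs y with
        | none => simp
        | some m => simp; ring

theorem B_getElem? (xs ys : List String) (k : Nat) :
    (dup2_alt xs ys)[k]? =
      xs[k]?.map (fun v => if v ∈ ys ∨ v ∈ xs.take k then "yes" else "no") := by
  unfold dup2_alt
  simp only
  rw [List.getElem?_map, PySem.List.getElem?_enumerate]
  cases hv : xs[k]? with
  | none => simp
  | some v =>
    obtain ⟨hk, hvk⟩ := List.getElem?_eq_some_iff.mp hv
    have hmem : v ∈ xs := hvk ▸ List.getElem_mem hk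
    obtain ⟨j, hj⟩ := Option.isSome_iff_exists.mp
      ((PySem.List.index?_isSome_iff xs v).mpr hmem)
    have hfirst :
        ((PySem.List.enumerate xs 0).foldl
          (fun d p => if d.contains p.2 then d else d.insert p.2 p.1)
          PySem.Dict.empty).getD v 0 = (j : Int) := by
      rw [PySem.Dict.getD_eq_get?_getD, firsts_get?, PySem.Dict.get?_empty, hj]
      simp
    obtain ⟨hjlt, hjeq, hjmin⟩ := PySem.List.getElem_of_index?_eq_some hj
    have hjk : j ≤ k := by
      by_contra h
      exact hjmin k (by omega) hvk
    have hiff : ((j : Int) = (0 : Int) + (k : Nat)) ↔ v ∉ xs.take k := by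
      constructor
      · intro he hin
        have hje : j = k := by omega
        subst hje
        obtain ⟨m, hm, hme⟩ := List.mem_take_iff_getElem.mp hin
        exact hjmin m (by omega) hme
      · intro hnin
        rcases Nat.lt_or_ge j k with h | h
        · exact absurd (List.mem_take_iff_getElem.mpr ⟨j, by omega, hjeq⟩) hnin
        · have : j = k := by omega
          simp [this]
    have hcont : (PySem.Set.contains (PySem.Set.ofList ys) v = true) ↔ v ∈ ys := by
      rw [PySem.Set.contains_iff, PySem.Set.mem_ofList]
    simp only [Option.map_some, Option.some.injEq, hfirst]
    by_cases h1 : v ∈ ys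
    · simp [h1]
    · by_cases h2 : v ∈ xs.take k
      · have hne : ¬((j : Int) = (0 : Int) + (k : Nat)) := fun he => (hiff.1 he) h2
        simp [h1, h2]
        omega
      · have he := hiff.2 h2
        simp [h1, h2]
        omega

-- ===== VERDICT (by name: the statement is the Claim_ definition above) =====
theorem dup2_spec : Claim_equal_dup2 := by
  intro xs ys _
  unfold Spec_dup2
  rw [dup2_eq_refSpec]
  apply List.ext_getElem?
  intro k
  rw [refSpec_getElem?, B_getElem?]
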